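-- pv_equiv track=rewrite | github.com/WojciechMula/utf16utf8 | scripts/sse_utf8_to_utf16.py | classify_aux
-- ===== SOURCE A (Python) =====
-- class WrongInput(Exception):
--     pass
--
-- def classify_aux(input_bit7, input_bit6):
--     bytes_count = []
--     multibyte = 0
--
--     def flush():
--         if multibyte > 0:
--             if multibyte == 1:
--                 # malformed input: 11 followed by another 11 or 00/01
--                 raise WrongInput()
--
--             bytes_count.append(multibyte)
--
--     for bit in range(8):
--         b6 = int(bool(input_bit6 & (1 << bit)))
--         b7 = int(bool(input_bit7 & (1 << bit)))
--
--         if b7 == 0: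
--             # ASCII, b6 is part of data
--             flush()
--             bytes_count.append(1)
--             multibyte = 0
--         else:
--             assert b7 == 1
--             if b6 == 1:
--                 # the first byte of multibyte char
--                 flush()
--                 multibyte = 1
--             else:
--                 # one of tail bytes of multibyte char
--                 if multibyte == 0:
--                     # wrong sequence: 0x 10 -- no leading byte
--                     raise WrongInput()
--
--                 multibyte += 1
--
--     # We are done. If there's no ASCII characters at the end of input
--     # and some multibyte character has identified, we cannot tell just
--     # from the two most significat bits the real length of such character.
--
--     if multibyte > 4:
--         # malformed input: head is valid, but the last (unfinished) char is too long
--         # like: 00 00 00 11 10 10 10 10 (last char at least 5 chars?)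
--         raise WrongInput()
--
--     tmp = [count for count in bytes_count if count <= 4]
--     if tmp == bytes_count and bytes_count:
--         return bytes_count
--     else:
--         # reject malformed inputs, like 11, 10, 10, 10, 10, 10, 00 [a 6-byte character]
--         raise WrongInput()
-- ===== SOURCE B (Python) =====
-- class WrongInput(Exception):
--     pass
--
-- def _kind(input_bit7, input_bit6, i):
--     # 0 = ASCII (char start), 1 = lead byte (char start), 2 = tail byte
--     if not (input_bit7 & (1 << i)):
--         return 0
--     if input_bit6 & (1 << i):
--         return 1
--     return 2
--
-- def _segments(starts):
--     # starts: list of (index, kind) of char starts; returns completed char lengths,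
--     # validating each segment; the trailing multibyte char is validated but dropped.
--     if not starts:
--         return []
--     (i, k), rest = starts[0], starts[1:]
--     nxt = rest[0][0] if rest else 8
--     length = nxt - i
--     if k == 0:
--         if length != 1:
--             raise WrongInput()          # tail byte directly after an ASCII byte
--         return [1] + _segments(rest)
--     if length == 1 and rest:
--         raise WrongInput()              # lead byte with no tail
--     if length > 4:
--         raise WrongInput()              # character longer than 4 bytes
--     if rest:
--         return [length] + _segments(rest)
--     return []                           # trailing unfinished multibyte char: dropped
--
-- def classify_aux(input_bit7, input_bit6):
--     kinds = [_kind(input_bit7, input_bit6, i) for i in range(8)]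
--     starts = [(i, k) for i, k in enumerate(kinds) if k != 2]
--     if not starts or starts[0][0] != 0:
--         raise WrongInput()              # tail byte with no preceding char start
--     out = _segments(starts)
--     if not out:
--         raise WrongInput()              # no completed character
--     return out
-- ===== Notes on version B (the rewrite author's own statement) =====
-- stated objective: simpler
-- what changed: A simulates a byte-at-a-time state machine with a mutable multibyte counter and a flush closure; B classifies each of the 8 bit positions as ASCII/lead/tail once, collects the char-start positions, and derives each character's length as the gap to the next start, validating segments and dropping the trailing unfinished character.
import Mathlib
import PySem

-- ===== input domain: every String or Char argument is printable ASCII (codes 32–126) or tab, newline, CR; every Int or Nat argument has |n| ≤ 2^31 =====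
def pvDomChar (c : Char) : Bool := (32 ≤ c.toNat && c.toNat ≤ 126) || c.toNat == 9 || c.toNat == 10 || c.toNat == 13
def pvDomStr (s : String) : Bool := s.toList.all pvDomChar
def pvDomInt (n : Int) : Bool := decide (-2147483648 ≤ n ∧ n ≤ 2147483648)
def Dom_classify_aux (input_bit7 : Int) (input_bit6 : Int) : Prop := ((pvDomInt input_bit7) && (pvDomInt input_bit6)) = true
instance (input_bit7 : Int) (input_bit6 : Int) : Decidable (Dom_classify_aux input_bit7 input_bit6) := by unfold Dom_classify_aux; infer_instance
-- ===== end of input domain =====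

-- B replaces A's stateful flush/multibyte loop by a start-index/gap decomposition (simpler, same cost);
-- where Python A raises WrongInput the ports return [] and Pre_ excludes exactly those inputs.

-- ===== PORT A =====
-- A's inner 'flush()': none = 'raise WrongInput' (a 1-byte multibyte char), else the updated bytes_count
def aFlush (bc : List Int) (mb : Int) : Option (List Int) :=
  if mb > 0 then (if mb = 1 then none else some (bc ++ [mb])) else some bc

def classify_aux (input_bit7 : Int) (input_bit6 : Int) : List Int :=
  -- state: none = WrongInput already raised; some (bytes_count, multibyte)
  match (PySem.List.pyRange 0 8 1).foldl (fun st bit =>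
    match st with
    | none => none
    | some (bc, mb) =>
      -- bit ∈ range(8) is nonnegative, so '.toNat' is exact for Python's '1 << bit'
      let b6 : Int := if PySem.Int.band input_bit6 ((1 : Int) <<< bit.toNat) ≠ 0 then 1 else 0
      let b7 : Int := if PySem.Int.band input_bit7 ((1 : Int) <<< bit.toNat) ≠ 0 then 1 else 0
      if b7 = 0 then
        match aFlush bc mb with
        | none => none
        | some bc' => some (bc' ++ [1], 0)
      else if b6 = 1 then
        match aFlush bc mb with
        | none => none
        | some bc' => some (bc', 1)
      else
        if mb = 0 then none else some (bc, mb + 1)) (some ([], 0)) with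
  | none => []
  | some (bc, mb) =>
    if mb > 4 then []
    else if bc.filter (fun c => decide (c ≤ 4)) = bc ∧ bc ≠ [] then bc else []
-- ===== PORT B =====
-- Source B's '_kind': 0 = ASCII (char start), 1 = lead byte (char start), 2 = tail byte
-- (i comes from range(8), so nonnegative: '.toNat' is exact for Python's '1 << i')
def pyKind (input_bit7 : Int) (input_bit6 : Int) (i : Int) : Nat :=
  if PySem.Int.band input_bit7 ((1 : Int) <<< i.toNat) = 0 then 0
  else if PySem.Int.band input_bit6 ((1 : Int) <<< i.toNat) ≠ 0 then 1 else 2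

-- Source B's '_segments': none = 'raise WrongInput'
def bSegments : List (Int × Nat) → Option (List Int)
  | [] => some []
  | (i, k) :: rest =>
    let nxt : Int := match rest with | [] => 8 | (j, _) :: _ => j
    let len := nxt - i
    if k = 0 then
      if len ≠ 1 then none
      else match bSegments rest with | none => none | some t => some (1 :: t)
    else if len = 1 ∧ rest ≠ [] then none
    else if len > 4 then none
    else if rest ≠ [] then
      match bSegments rest with | none => none | some t => some (len :: t)
    else some []

def classify_aux_alt (input_bit7 : Int) (input_bit6 : Int) : List Int :=
  let kinds : List Nat := (PySem.List.pyRange 0 8 1).map (fun i => pyKind input_bit7 input_bit6 i)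
  let starts := (PySem.List.enumerate kinds).filter (fun p => p.2 != 2)
  match starts with
  | [] => []                                -- raise WrongInput
  | (i, _) :: _ =>
    if i ≠ 0 then []                        -- raise WrongInput
    else match bSegments starts with
      | none => []                          -- raise WrongInput
      | some out => if out = [] then [] else out

-- ===== PRECONDITION & SPEC =====
-- Pre_ = exactly the inputs where Python A returns (no WrongInput), stated on the 8 low-bit classes:
-- every tail byte follows a non-ASCII byte, every lead byte (except a trailing one) is followed by a
-- tail, no character spans 5 bytes, and at least one character is completed.
def Pre_classify_aux (input_bit7 : Int) (input_bit6 : Int) : Prop :=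
  (∀ i ∈ List.range 8, pyKind input_bit7 input_bit6 (i : Int) = 2 →
      0 < i ∧ pyKind input_bit7 input_bit6 ((i : Int) - 1) ≠ 0) ∧
  (∀ i ∈ List.range 7, pyKind input_bit7 input_bit6 (i : Int) = 1 →
      pyKind input_bit7 input_bit6 ((i : Int) + 1) = 2) ∧
  (∀ i ∈ List.range 4, ¬ (pyKind input_bit7 input_bit6 (i : Int) = 1 ∧
      pyKind input_bit7 input_bit6 ((i : Int) + 1) = 2 ∧
      pyKind input_bit7 input_bit6 ((i : Int) + 2) = 2 ∧
      pyKind input_bit7 input_bit6 ((i : Int) + 3) = 2 ∧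
      pyKind input_bit7 input_bit6 ((i : Int) + 4) = 2)) ∧
  (∃ i ∈ List.range 8, pyKind input_bit7 input_bit6 (i : Int) = 0 ∨
      (pyKind input_bit7 input_bit6 (i : Int) = 1 ∧
       ∃ j ∈ List.range 8, i < j ∧ pyKind input_bit7 input_bit6 (j : Int) ≠ 2))
instance (input_bit7 : Int) (input_bit6 : Int) : Decidable (Pre_classify_aux input_bit7 input_bit6) := by
  unfold Pre_classify_aux; infer_instance

def pvWitness_classify_aux : Int × Int := (0, 0)

def Spec_classify_aux (input_bit7 : Int) (input_bit6 : Int) (out : List Int) : Prop := out = classify_aux_alt input_bit7 input_bit6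
instance (input_bit7 : Int) (input_bit6 : Int) (out : List Int) : Decidable (Spec_classify_aux input_bit7 input_bit6 out) := by unfold Spec_classify_aux; infer_instance

-- ===== CLAIM (what is proved, stated in full; the proofs are below) =====
def Claim_equal_classify_aux : Prop := ∀ (input_bit7 : Int) (input_bit6 : Int), Dom_classify_aux input_bit7 input_bit6 → Pre_classify_aux input_bit7 input_bit6 → Spec_classify_aux input_bit7 input_bit6 (classify_aux input_bit7 input_bit6)

-- ===== LEMMAS AND PROOFS =====

-- A's loop body as a function of the byte class alone
def gA (st : Option (List Int × Int)) (k : Nat) : Option (List Int × Int) :=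
  match st with
  | none => none
  | some (bc, mb) =>
    if k = 0 then
      match aFlush bc mb with
      | none => none
      | some bc' => some (bc' ++ [1], 0)
    else if k = 1 then
      match aFlush bc mb with
      | none => none
      | some bc' => some (bc', 1)
    else
      if mb = 0 then none else some (bc, mb + 1)

def finishA (r : Option (List Int × Int)) : List Int :=
  match r with
  | none => []
  | some (bc, mb) =>
    if mb > 4 then []
    else if bc.filter (fun c => decide (c ≤ 4)) = bc ∧ bc ≠ [] then bc else []

def kindList (input_bit7 : Int) (input_bit6 : Int) : List Nat :=
  (PySem.List.pyRange 0 8 1).map (fun i => pyKind input_bit7 input_bit6 i)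

-- B's whole computation as a function of the byte-class list
def altRun (kinds : List Nat) : List Int :=
  let starts := (PySem.List.enumerate kinds).filter (fun p => p.2 != 2)
  match starts with
  | [] => []
  | (i, _) :: _ =>
    if i ≠ 0 then []
    else match bSegments starts with
      | none => []
      | some out => if out = [] then [] else out

def checkOne (l : List Nat) : Bool :=
  decide (finishA (l.foldl gA (some ([], 0))) = altRun l)

-- checks checkOne on every byte-class list of length n extending acc on the left (a balanced tree)
def checkUpto : Nat → List Nat → Bool
  | 0, acc => checkOne acc
  | n + 1, acc => checkUpto n (0 :: acc) && checkUpto n (1 :: acc) && checkUpto n (2 :: acc)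

lemma checkUpto_sound (n : Nat) : ∀ acc, checkUpto n acc = true →
    ∀ l : List Nat, l.length = n → (∀ k ∈ l, k < 3) → checkOne (l ++ acc) = true := by
  induction n with
  | zero =>
    intro acc h l hlen _
    rw [List.length_eq_zero_iff] at hlen
    simpa [hlen] using h
  | succ m ih =>
    intro acc h l hlen hk
    rcases List.eq_nil_or_concat l with rfl | ⟨t, x, rfl⟩
    · simp at hlen
    · have hx : x < 3 := hk x (by simp)
      have ht : t.length = m := by simpa using hlen
      simp only [checkUpto, Bool.and_eq_true] at h
      have h' : checkUpto m (x :: acc) = true := by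
        interval_cases x
        · exact h.1.1
        · exact h.1.2
        · exact h.2
      have := ih (x :: acc) h' t ht (fun k hkm => hk k (by simp [hkm]))
      simpa [List.append_assoc] using this

lemma pyKind_lt3 (a b i : Int) : pyKind a b i < 3 := by
  unfold pyKind; split_ifs <;> omega

lemma kindList_props (a b : Int) : (kindList a b).length = 8 ∧ ∀ k ∈ kindList a b, k < 3 := by
  constructor
  · simp [kindList, PySem.List.pyRange]
  · intro k hk
    simp only [kindList, List.mem_map] at hk
    obtain ⟨i, _, rfl⟩ := hk
    exact pyKind_lt3 _ _ _

lemma classify_aux_eq_run (a b : Int) :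
    classify_aux a b = finishA ((kindList a b).foldl gA (some ([], 0))) := by
  unfold classify_aux finishA kindList
  rw [List.foldl_map]
  have hb : (fun st bit =>
    match st with
    | none => none
    | some (bc, mb) =>
      -- bit ∈ range(8) is nonnegative, so '.toNat' is exact for Python's '1 << bit'
      let b6 : Int := if PySem.Int.band b ((1 : Int) <<< bit.toNat) ≠ 0 then 1 else 0
      let b7 : Int := if PySem.Int.band a ((1 : Int) <<< bit.toNat) ≠ 0 then 1 else 0
      if b7 = 0 then
        match aFlush bc mb with
        | none => none
        | some bc' => some (bc' ++ [1], 0)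
      else if b6 = 1 then
        match aFlush bc mb with
        | none => none
        | some bc' => some (bc', 1)
      else
        if mb = 0 then none else some (bc, mb + 1)) = (fun st i => gA st (pyKind a b i)) := by
    funext st i
    cases st with
    | none => rfl
    | some p =>
      obtain ⟨bc, mb⟩ := p
      by_cases h7 : PySem.Int.band a ((1 : Int) <<< i.toNat) = 0 <;>
        by_cases h6 : PySem.Int.band b ((1 : Int) <<< i.toNat) = 0 <;>
          simp [gA, pyKind, h6, h7]
  rw [hb]

lemma classify_aux_alt_eq_run (a b : Int) :
    classify_aux_alt a b = altRun (kindList a b) := rfl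

set_option maxHeartbeats 4000000 in
set_option maxRecDepth 8192 in
lemma checkUpto_true : checkUpto 8 [] = true := by decide

-- ===== VERDICT (by name: the statement is the Claim_ definition above) =====
theorem classify_aux_spec : Claim_equal_classify_aux := by
  intro a b _ _
  unfold Spec_classify_aux
  rw [classify_aux_eq_run, classify_aux_alt_eq_run]
  obtain ⟨hlen, hlt⟩ := kindList_props a b
  have := checkUpto_sound 8 [] checkUpto_true (kindList a b) hlen hlt
  simpa [checkOne] using this
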